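-- pv_equiv track=rewrite | github.com/JoseFrags/checkpoint. | problem1.py | sum_of_distinct_elements
-- ===== SOURCE A (Python) =====
-- def sum_of_distinct_elements(set1, set2):
--     distinct_elements = {}
--
--     # Count distinct elements from set1
--     for element in set1:
--         distinct_elements[element] = distinct_elements.get(element, 0) + 1
--
--     # Count distinct elements from set2
--     for element in set2:
--         distinct_elements[element] = distinct_elements.get(element, 0) + 1
--
--     result = 0
--     for element, count in distinct_elements.items():
--         if count == 1:
--             result += element
--
--     return result
-- ===== SOURCE B (Python) =====
-- def sum_of_distinct_elements(set1, set2):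
--     seen_once = set()
--     seen_multiple = set()
--     for element in list(set1) + list(set2):
--         if element in seen_multiple:
--             continue
--         elif element in seen_once:
--             seen_once.discard(element)
--             seen_multiple.add(element)
--         else:
--             seen_once.add(element)
--     return sum(seen_once)
-- ===== Notes on version B (the rewrite author's own statement) =====
-- stated objective: alternative
-- what changed: Replaces A's count-dictionary plus a separate filtering pass with a single pass over the concatenation maintaining two sets (seen_once / seen_multiple) and summing seen_once at the end.
import Mathlib
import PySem

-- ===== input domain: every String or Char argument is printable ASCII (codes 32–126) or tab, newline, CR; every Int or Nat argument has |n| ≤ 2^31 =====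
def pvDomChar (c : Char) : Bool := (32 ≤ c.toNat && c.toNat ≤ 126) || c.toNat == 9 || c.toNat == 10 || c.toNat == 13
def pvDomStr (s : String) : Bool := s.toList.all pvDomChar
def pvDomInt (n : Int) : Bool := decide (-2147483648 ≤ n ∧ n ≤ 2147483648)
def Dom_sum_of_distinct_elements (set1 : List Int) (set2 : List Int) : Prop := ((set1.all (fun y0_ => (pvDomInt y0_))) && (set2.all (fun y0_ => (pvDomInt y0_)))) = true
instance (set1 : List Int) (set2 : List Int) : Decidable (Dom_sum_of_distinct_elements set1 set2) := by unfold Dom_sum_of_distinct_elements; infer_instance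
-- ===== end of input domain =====

-- B replaces A's count-dictionary plus separate filtering pass with a single pass over the
-- concatenation maintaining two sets (seen_once / seen_multiple); alternative decomposition, same cost.


-- ===== PORT A =====
def sum_of_distinct_elements (set1 : List Int) (set2 : List Int) : Int :=
  (set2.foldl (fun d element => d.insert element (d.getD element 0 + 1))
      (set1.foldl (fun d element => d.insert element (d.getD element 0 + 1))
        PySem.Dict.empty)).items.foldl
    (fun result p => if p.2 == (1 : Int) then result + p.1 else result) 0

-- ===== PORT B =====
-- one step of B's loop body over (seen_once, seen_multiple)
def pvStepB (st : PySem.Set Int × PySem.Set Int) (element : Int) : PySem.Set Int × PySem.Set Int :=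
  if PySem.Set.contains st.2 element then st
  else if PySem.Set.contains st.1 element then
    (PySem.Set.discard st.1 element, PySem.Set.add st.2 element)
  else (PySem.Set.add st.1 element, st.2)

def sum_of_distinct_elements_alt (set1 : List Int) (set2 : List Int) : Int :=
  ((set1 ++ set2).foldl pvStepB (PySem.Set.empty, PySem.Set.empty)).1.sum

-- ===== PRECONDITION & SPEC =====
def Spec_sum_of_distinct_elements (set1 : List Int) (set2 : List Int) (out : Int) : Prop := out = sum_of_distinct_elements_alt set1 set2
instance (set1 : List Int) (set2 : List Int) (out : Int) : Decidable (Spec_sum_of_distinct_elements set1 set2 out) := by unfold Spec_sum_of_distinct_elements; infer_instance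

-- ===== CLAIM (what is proved, stated in full; the proofs are below) =====
def Claim_equal_sum_of_distinct_elements : Prop := ∀ (set1 : List Int) (set2 : List Int), Dom_sum_of_distinct_elements set1 set2 → Spec_sum_of_distinct_elements set1 set2 (sum_of_distinct_elements set1 set2)

-- ===== LEMMAS AND PROOFS =====

-- two Nat-equality tests with equivalent conditions give the same Bool
lemma pvBeqCongr {a b : Nat} (h : a = 1 ↔ b = 1) : (a == 1) = (b == 1) := by
  by_cases ha : a = 1
  · rw [ha, h.mp ha]
  · have hb : ¬ b = 1 := fun hh => ha (h.mpr hh)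
    simp [ha, hb]

-- A's final accumulation loop is the sum of the first components of the count-1 items
lemma pvFoldIf (ps : List (Int × Int)) (r0 : Int) :
    ps.foldl (fun r p => if p.2 == (1 : Int) then r + p.1 else r) r0
      = r0 + ((ps.filter (fun p => p.2 == (1 : Int))).map Prod.fst).sum := by
  induction ps generalizing r0 with
  | nil => simp
  | cons p t ih =>
    rw [List.foldl_cons, List.filter_cons]
    by_cases h : (p.2 == (1 : Int)) = true
    · rw [if_pos h, if_pos h, ih, List.map_cons, List.sum_cons]
      ring
    · rw [if_neg h, if_neg h, ih]

-- loop invariant of B, phrased on the whole processed list: seen_once is exactly the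
-- first-occurrence list of the elements with total count 1, and seen_multiple's members
-- are exactly the elements with count ≥ 2
lemma pvInvB (l : List Int) :
    (l.foldl pvStepB (PySem.Set.empty, PySem.Set.empty)).1
        = (PySem.Set.ofList l).filter (fun y => l.count y == 1)
    ∧ ∀ y : Int, y ∈ (l.foldl pvStepB (PySem.Set.empty, PySem.Set.empty)).2 ↔ 2 ≤ l.count y := by
  induction l using List.reverseRecOn with
  | nil => constructor <;> simp [PySem.Set.empty]
  | append_singleton l x ih =>
    obtain ⟨ih1, ih2⟩ := ih
    rw [List.foldl_append]
    have hmem1 : ∀ y : Int,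
        PySem.Set.contains (l.foldl pvStepB (PySem.Set.empty, PySem.Set.empty)).1 y = true
          ↔ l.count y = 1 := by
      intro y
      rw [PySem.Set.contains_iff, ih1]
      simp only [List.mem_filter, PySem.Set.mem_ofList, beq_iff_eq]
      constructor
      · rintro ⟨-, h⟩; exact h
      · intro h; exact ⟨by rw [← List.count_pos_iff]; omega, h⟩
    have hmem2 : ∀ y : Int,
        PySem.Set.contains (l.foldl pvStepB (PySem.Set.empty, PySem.Set.empty)).2 y = true
          ↔ 2 ≤ l.count y := by
      intro y; rw [PySem.Set.contains_iff]; exact ih2 y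
    have hcount : ∀ y : Int, (l ++ [x]).count y = l.count y + if y = x then 1 else 0 := by
      intro y
      rcases eq_or_ne y x with rfl | h
      · simp [List.count_append]
      · simp [List.count_append, h, Ne.symm h]
    have hofl : PySem.Set.ofList (l ++ [x]) = PySem.Set.add (PySem.Set.ofList l) x :=
      PySem.Set.ofList_append_singleton l x
    rw [List.foldl_cons, List.foldl_nil]
    have hstep : ∀ (st : PySem.Set Int × PySem.Set Int) (e : Int),
        pvStepB st e = if PySem.Set.contains st.2 e then st
          else if PySem.Set.contains st.1 e then
            (PySem.Set.discard st.1 e, PySem.Set.add st.2 e)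
          else (PySem.Set.add st.1 e, st.2) := fun _ _ => rfl
    by_cases h2 : 2 ≤ l.count x
    · -- x already seen multiple times: state unchanged
      have hxS : x ∈ PySem.Set.ofList l := by
        rw [PySem.Set.mem_ofList, ← List.count_pos_iff]; omega
      rw [hstep, if_pos ((hmem2 x).2 h2)]
      constructor
      · rw [ih1, hofl, PySem.Set.add_of_mem hxS]
        apply List.filter_congr
        intro y hy
        apply pvBeqCongr
        rw [hcount y]
        rcases eq_or_ne y x with rfl | hyx
        · rw [if_pos (rfl : y = y)]; omega
        · simp [hyx]
      · intro y
        rw [ih2 y, hcount y]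
        rcases eq_or_ne y x with rfl | hyx
        · rw [if_pos (rfl : y = y)]; omega
        · simp only [if_neg hyx, add_zero]
    · by_cases h1 : l.count x = 1
      · -- second occurrence: move x from seen_once to seen_multiple
        have hxS : x ∈ PySem.Set.ofList l := by
          rw [PySem.Set.mem_ofList, ← List.count_pos_iff]; omega
        have hno2 : ¬ PySem.Set.contains
            (l.foldl pvStepB (PySem.Set.empty, PySem.Set.empty)).2 x = true := by
          rw [hmem2 x]; omega
        rw [hstep, if_neg hno2, if_pos ((hmem1 x).2 h1)]
        constructor
        · rw [ih1, hofl, PySem.Set.add_of_mem hxS]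
          simp only [PySem.Set.discard, List.filter_filter]
          apply List.filter_congr
          intro y hy
          rcases eq_or_ne y x with rfl | hyx
          · simp [hcount y, h1]
          · simp [hyx, hcount y]
        · intro y
          rw [PySem.Set.mem_add, ih2 y, hcount y]
          rcases eq_or_ne y x with rfl | hyx
          · rw [if_pos (rfl : y = y)]
            constructor
            · intro _; omega
            · intro _; exact Or.inr rfl
          · simp only [if_neg hyx, add_zero]
            constructor
            · rintro (h | h)
              · exact h
              · exact absurd h hyx
            · exact Or.inl
      · -- first occurrence: add x to seen_once
        have h0 : l.count x = 0 := by omega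
        have hxS : x ∉ PySem.Set.ofList l := by
          rw [PySem.Set.mem_ofList, ← List.count_pos_iff]; omega
        have hno2 : ¬ PySem.Set.contains
            (l.foldl pvStepB (PySem.Set.empty, PySem.Set.empty)).2 x = true := by
          rw [hmem2 x]; omega
        have hno1 : ¬ PySem.Set.contains
            (l.foldl pvStepB (PySem.Set.empty, PySem.Set.empty)).1 x = true := by
          rw [hmem1 x]; omega
        rw [hstep, if_neg hno2, if_neg hno1]
        constructor
        · rw [ih1, hofl, PySem.Set.add_of_not_mem hxS,
            PySem.Set.add_of_not_mem (fun hmem => hxS (List.mem_filter.mp hmem).1),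
            List.filter_append]
          have hfx : List.filter (fun y => (l ++ [x]).count y == 1) [x] = [x] := by
            simp [List.filter, hcount x, h0]
          rw [hfx]
          show List.filter (fun y => List.count y l == 1) (PySem.Set.ofList l) ++ [x]
              = List.filter (fun y => List.count y (l ++ [x]) == 1) (PySem.Set.ofList l) ++ [x]
          congr 1
          apply List.filter_congr
          intro y hy
          have hyx : y ≠ x := fun h => hxS (h ▸ hy)
          apply pvBeqCongr
          rw [hcount y]
          simp [hyx]
        · intro y
          rw [ih2 y, hcount y]
          rcases eq_or_ne y x with rfl | hyx
          · rw [if_pos (rfl : y = y)]; omega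
          · simp only [if_neg hyx, add_zero]

-- A computed in closed form: its dict is Counter(set1 ++ set2)
lemma pvA_closed (set1 set2 : List Int) :
    sum_of_distinct_elements set1 set2
      = ((PySem.Set.ofList (set1 ++ set2)).filter
            (fun y => (set1 ++ set2).count y == 1)).sum := by
  unfold sum_of_distinct_elements
  rw [← List.foldl_append,
    PySem.Dict.foldl_insert_getD_add_one_eq_counter, PySem.Dict.items_counter, pvFoldIf,
    List.filter_map, List.map_map, zero_add]
  have hpred : ∀ y ∈ PySem.Set.ofList (set1 ++ set2),
      ((fun p : Int × Int => p.2 == (1 : Int)) ∘ fun k => (k, ((set1 ++ set2).count k : Int))) y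
        = ((set1 ++ set2).count y == 1) := by
    intro y _
    simp only [Function.comp_apply]
    by_cases h : (set1 ++ set2).count y = 1
    · rw [h]; decide
    · have h1 : (((set1 ++ set2).count y : Int) == 1) = false := by
        rw [beq_eq_false_iff_ne]; exact_mod_cast h
      have hn : ((set1 ++ set2).count y == 1) = false := by
        rw [beq_eq_false_iff_ne]; exact h
      rw [h1, hn]
  rw [List.filter_congr hpred,
    show (Prod.fst ∘ fun k : Int => (k, ((set1 ++ set2).count k : Int))) = id from rfl,
    List.map_id]

-- ===== VERDICT (by name: the statement is the Claim_ definition above) =====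
theorem sum_of_distinct_elements_spec : Claim_equal_sum_of_distinct_elements := by
  intro set1 set2 _
  unfold Spec_sum_of_distinct_elements sum_of_distinct_elements_alt
  rw [pvA_closed, (pvInvB (set1 ++ set2)).1]
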